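-- pv_equiv track=rewrite | github.com/borgmatic-collective/borgmatic | borgmatic/commands/arguments.py | group_arguments_with_values
-- ===== SOURCE A (Python) =====
-- ACTION_ALIASES = {
--     'repo-create': ['rcreate', 'init', '-I'],
--     'prune': ['-p'],
--     'compact': [],
--     'create': ['-C'],
--     'check': ['-k'],
--     'config': [],
--     'delete': [],
--     'extract': ['-x'],
--     'export-tar': [],
--     'mount': ['-m'],
--     'umount': ['-u'],
--     'restore': ['-r'],
--     'repo-delete': ['rdelete'],
--     'repo-list': ['rlist'],
--     'list': ['-l'],
--     'repo-info': ['rinfo'],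
--     'info': ['-i'],
--     'transfer': [],
--     'break-lock': [],
--     'key': [],
--     'borg': [],
--     'recreate': [],
-- }
--
-- def argument_is_flag(argument):
--     '''
--     Return True if the given argument looks like a flag, e.g. '--some-flag', as opposed to a
--     non-flag value.
--     '''
--     return isinstance(argument, str) and argument.startswith('--')
--
-- def group_arguments_with_values(arguments):
--     '''
--     Given a sequence of arguments, return a sequence of tuples where each one contains either a
--     single argument (such as for a stand-alone flag) or a flag argument and its corresponding value.
--
--     For instance, given the following arguments sequence as input:
--
--       ('--foo', '--bar', '33', '--baz')
--
--     ... return the following output: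
--
--       (('--foo',), ('--bar', '33'), ('--baz',))
--     '''
--     grouped_arguments = []
--     index = 0
--
--     while index < len(arguments):
--         this_argument = arguments[index]
--
--         try:
--             next_argument = arguments[index + 1]
--         except IndexError:
--             grouped_arguments.append((this_argument,))
--             break
--
--         if (
--             argument_is_flag(this_argument)
--             and not argument_is_flag(next_argument)
--             and next_argument not in ACTION_ALIASES
--         ):
--             grouped_arguments.append((this_argument, next_argument))
--             index += 2
--             continue
--
--         grouped_arguments.append((this_argument,))
--         index += 1
--
--     return tuple(grouped_arguments)
-- ===== SOURCE B (Python) =====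
-- ACTION_ALIASES = {
--     'repo-create': ['rcreate', 'init', '-I'],
--     'prune': ['-p'],
--     'compact': [],
--     'create': ['-C'],
--     'check': ['-k'],
--     'config': [],
--     'delete': [],
--     'extract': ['-x'],
--     'export-tar': [],
--     'mount': ['-m'],
--     'umount': ['-u'],
--     'restore': ['-r'],
--     'repo-delete': ['rdelete'],
--     'repo-list': ['rlist'],
--     'list': ['-l'],
--     'repo-info': ['rinfo'],
--     'info': ['-i'],
--     'transfer': [],
--     'break-lock': [],
--     'key': [],
--     'borg': [],
--     'recreate': [],
-- }
--
-- def argument_is_flag(argument):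
--     return isinstance(argument, str) and argument.startswith('--')
--
-- def group_arguments_with_values(arguments):
--     # Single forward pass: `held` is the last flag still awaiting a value.
--     grouped_arguments = []
--     held = None
--     for argument in arguments:
--         if held is not None and not argument_is_flag(argument) and argument not in ACTION_ALIASES:
--             grouped_arguments.append((held, argument))
--             held = None
--             continue
--         if held is not None:
--             grouped_arguments.append((held,))
--             held = None
--         if argument_is_flag(argument):
--             held = argument
--         else:
--             grouped_arguments.append((argument,))
--     if held is not None:
--         grouped_arguments.append((held,))
--     return tuple(grouped_arguments)
-- ===== Notes on version B (the rewrite author's own statement) =====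
-- stated objective: alternative
-- what changed: Replaced A's index-based while loop with arguments[index+1] lookahead (via try/except IndexError) by a single forward for-loop that carries the last flag still awaiting a value in a `held` variable, pairing or flushing it as each argument arrives.
import Mathlib
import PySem

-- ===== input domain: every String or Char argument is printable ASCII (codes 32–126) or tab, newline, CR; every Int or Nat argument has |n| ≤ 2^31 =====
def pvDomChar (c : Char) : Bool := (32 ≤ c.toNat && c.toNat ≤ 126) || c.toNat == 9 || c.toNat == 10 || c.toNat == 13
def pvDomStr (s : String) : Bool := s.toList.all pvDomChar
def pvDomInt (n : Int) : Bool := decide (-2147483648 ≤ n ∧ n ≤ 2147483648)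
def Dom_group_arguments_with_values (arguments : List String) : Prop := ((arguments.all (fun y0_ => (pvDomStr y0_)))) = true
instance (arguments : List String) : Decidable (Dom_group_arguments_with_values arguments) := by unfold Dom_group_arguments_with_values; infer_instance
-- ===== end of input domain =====

-- B replaces A's index+lookahead while loop by a single forward pass holding the pending flag; same O(n) cost (objective: alternative).

-- shared module context: ACTION_ALIASES keys and argument_is_flag
def actionAliasKeys : List String :=
  ["repo-create", "prune", "compact", "create", "check", "config", "delete",
   "extract", "export-tar", "mount", "umount", "restore", "repo-delete",
   "repo-list", "list", "repo-info", "info", "transfer", "break-lock", "key",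
   "borg", "recreate"]

def argument_is_flag (argument : String) : Bool := PySem.Str.startswith argument "--"

-- ===== PORT A =====
-- A's while loop with lookahead arguments[index+1]: consume two on a flag/value pair, else one.
def groupA : List String → List (List String)
  | [] => []
  | [x] => [[x]]
  | x :: y :: rest =>
    if argument_is_flag x && !argument_is_flag y && !(actionAliasKeys.contains y) then
      [x, y] :: groupA rest
    else
      [x] :: groupA (y :: rest)
termination_by l => l.length
decreasing_by all_goals (simp only [List.length_cons]; omega)

def group_arguments_with_values (arguments : List String) : List (List String) :=
  groupA arguments

-- ===== PORT B =====
-- B's single pass: `held` is the last flag still awaiting a value (None = none).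
def groupB : Option String → List String → List (List String)
  | none, [] => []
  | some h, [] => [[h]]
  | some h, x :: rest =>
    if !argument_is_flag x && !(actionAliasKeys.contains x) then
      [h, x] :: groupB none rest
    else
      [h] :: (if argument_is_flag x then groupB (some x) rest else [x] :: groupB none rest)
  | none, x :: rest =>
    if argument_is_flag x then groupB (some x) rest else [x] :: groupB none rest

def group_arguments_with_values_alt (arguments : List String) : List (List String) :=
  groupB none arguments

-- ===== PRECONDITION & SPEC =====
def Spec_group_arguments_with_values (arguments : List String) (out : List (List String)) : Prop := out = group_arguments_with_values_alt arguments
instance (arguments : List String) (out : List (List String)) : Decidable (Spec_group_arguments_with_values arguments out) := by unfold Spec_group_arguments_with_values; infer_instance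

-- ===== CLAIM (what is proved, stated in full; the proofs are below) =====
def Claim_equal_group_arguments_with_values : Prop := ∀ (arguments : List String), Dom_group_arguments_with_values arguments → Spec_group_arguments_with_values arguments (group_arguments_with_values arguments)

-- ===== LEMMAS AND PROOFS =====

-- Loop invariant: B with no held flag computes A's result; B holding a flag h
-- computes A's result on h prepended to the remaining input.
theorem groupB_eq_groupA : ∀ (n : ℕ) (l : List String), l.length ≤ n →
    groupB none l = groupA l ∧
    ∀ h, argument_is_flag h = true → groupB (some h) l = groupA (h :: l) := by
  intro n
  induction n with
  | zero =>
    intro l hl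
    have : l = [] := List.length_eq_zero_iff.mp (Nat.le_zero.mp hl)
    subst this
    exact ⟨by simp [groupB, groupA], fun h hh => by simp [groupB, groupA]⟩
  | succ n ih =>
    intro l hl
    cases l with
    | nil => exact ⟨by simp [groupB, groupA], fun h hh => by simp [groupB, groupA]⟩
    | cons x rest =>
      have hrest : rest.length ≤ n := by simpa using hl
      refine ⟨?_, ?_⟩
      · -- none case
        by_cases hx : argument_is_flag x = true
        · have hB : groupB none (x :: rest) = groupB (some x) rest := by
            simp only [groupB]; rw [if_pos hx]
          rw [hB, (ih rest hrest).2 x hx]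
        · simp only [Bool.not_eq_true] at hx
          have hB : groupB none (x :: rest) = [x] :: groupB none rest := by
            simp only [groupB]; rw [if_neg (by simp [hx])]
          cases rest with
          | nil => rw [hB]; simp [groupB, groupA]
          | cons y rest' =>
            have hA : groupA (x :: y :: rest') = [x] :: groupA (y :: rest') := by
              simp only [groupA]; rw [if_neg (by simp [hx])]
            rw [hB, hA, (ih _ hrest).1]
      · -- some h case
        intro h hh
        by_cases hx : (!argument_is_flag x && !(actionAliasKeys.contains x)) = true
        · have hA : groupA (h :: x :: rest) = [h, x] :: groupA rest := by
            simp only [groupA]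
            rw [if_pos]
            simp only [Bool.and_eq_true] at hx ⊢
            exact ⟨⟨hh, hx.1⟩, hx.2⟩
          have hB : groupB (some h) (x :: rest) = [h, x] :: groupB none rest := by
            simp only [groupB]; rw [if_pos hx]
          rw [hA, hB, (ih rest hrest).1]
        · have hA : groupA (h :: x :: rest) = [h] :: groupA (x :: rest) := by
            simp only [groupA]
            rw [if_neg]
            intro hc
            simp only [Bool.and_eq_true] at hc hx
            exact hx ⟨hc.1.2, hc.2⟩
          have hB : groupB (some h) (x :: rest)
              = [h] :: (if argument_is_flag x then groupB (some x) rest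
                        else [x] :: groupB none rest) := by
            simp only [groupB]; rw [if_neg hx]
          rw [hA, hB]
          by_cases hfx : argument_is_flag x = true
          · rw [if_pos hfx, (ih rest hrest).2 x hfx]
          · rw [if_neg hfx]
            simp only [Bool.not_eq_true] at hfx
            cases rest with
            | nil => simp [groupA, groupB]
            | cons y rest' =>
              rw [show groupA (x :: y :: rest') = [x] :: groupA (y :: rest') from by
                    simp only [groupA]; rw [if_neg (by simp [hfx])],
                  (ih _ hrest).1]

-- ===== VERDICT (by name: the statement is the Claim_ definition above) =====
theorem group_arguments_with_values_spec : Claim_equal_group_arguments_with_values := by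
  intro arguments _
  unfold Spec_group_arguments_with_values group_arguments_with_values group_arguments_with_values_alt
  exact ((groupB_eq_groupA arguments.length arguments le_rfl).1).symm
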